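-- pv_equiv track=rewrite | github.com/kevan20100125-rgb/cobra_new | cobra/pipeline/pct_apply.py | _guess_stage_from_module_name
-- ===== SOURCE A (Python) =====
-- from typing import Any, Dict, List, Mapping, Optional, Tuple, Union
--
-- def _guess_stage_from_module_name(name: str) -> Optional[str]:
--     lname = name.lower()
--     if "dino" in lname:
--         return "vision.dino"
--     if "siglip" in lname:
--         return "vision.siglip"
--     if "projector" in lname or "mm_projector" in lname:
--         return "projector"
--     if any(token in lname for token in ("llm", "mamba", "decoder", "language", "backbone")):
--         return "llm"
--     return None
-- ===== SOURCE B (Python) =====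
-- # Multi-pattern sliding-window scan: one pass over the string; at each position
-- # look the window of each token length up in a hash map and keep the best
-- # (lowest-priority-number) rank seen, then map the rank to its label.
-- _RANK = {
--     "dino": 0,
--     "siglip": 1,
--     "projector": 2,
--     "mm_projector": 2,
--     "llm": 3,
--     "mamba": 3,
--     "decoder": 3,
--     "language": 3,
--     "backbone": 3,
-- }
-- _LABELS = ("vision.dino", "vision.siglip", "projector", "llm")
-- _LENS = tuple(sorted({len(t) for t in _RANK}))
--
-- def _guess_stage_from_module_name(name):
--     lname = name.lower()
--     best = None
--     for i in range(len(lname)):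
--         for length in _LENS:
--             r = _RANK.get(lname[i:i + length])
--             if r is not None and (best is None or r < best):
--                 best = r
--     return None if best is None else _LABELS[best]
-- ===== Notes on version B (the rewrite author's own statement) =====
-- stated objective: alternative
-- what changed: Replaced A's per-token substring tests in an if/return chain by a single sliding-window scan: at each position every token-length window is looked up in a hash map from token to priority rank, the minimum rank seen is kept, and it is mapped to its label at the end.
import Mathlib
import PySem

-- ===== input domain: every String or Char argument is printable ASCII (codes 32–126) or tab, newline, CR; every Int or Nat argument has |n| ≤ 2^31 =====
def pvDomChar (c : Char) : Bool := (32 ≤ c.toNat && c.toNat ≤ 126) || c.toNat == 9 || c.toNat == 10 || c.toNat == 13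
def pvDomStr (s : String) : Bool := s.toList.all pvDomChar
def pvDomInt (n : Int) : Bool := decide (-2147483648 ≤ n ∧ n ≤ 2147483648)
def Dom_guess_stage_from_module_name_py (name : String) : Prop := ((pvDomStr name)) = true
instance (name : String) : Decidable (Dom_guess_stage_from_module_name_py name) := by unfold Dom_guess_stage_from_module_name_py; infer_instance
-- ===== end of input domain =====

-- B replaces A's per-token substring checks by a single sliding-window scan with a hash map
-- from window to priority rank, keeping the minimum rank (alternative algorithm; same result).
-- ===== PORT A =====
def guess_stage_from_module_name_py (name : String) : Option String :=
  let lname := PySem.Str.lower name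
  if PySem.Str.isIn "dino" lname then some "vision.dino"
  else if PySem.Str.isIn "siglip" lname then some "vision.siglip"
  else if PySem.Str.isIn "projector" lname || PySem.Str.isIn "mm_projector" lname then some "projector"
  else if ["llm", "mamba", "decoder", "language", "backbone"].any (fun token => PySem.Str.isIn token lname) then some "llm"
  else none

-- ===== PORT B =====
-- _RANK: the Python dict literal (string keys modeled as code-point lists, which is how
-- PySem models the sliced windows they are compared with)
def pvRankDict : PySem.Dict (List Char) Nat := PySem.Dict.mk
  [("dino".toList, 0), ("siglip".toList, 1), ("projector".toList, 2), ("mm_projector".toList, 2),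
   ("llm".toList, 3), ("mamba".toList, 3), ("decoder".toList, 3), ("language".toList, 3), ("backbone".toList, 3)]

def pvLabels : List String := ["vision.dino", "vision.siglip", "projector", "llm"]

-- _LENS = tuple(sorted({len(t) for t in _RANK}))
def pvLens : List Nat := [3, 4, 5, 6, 7, 8, 9, 12]

-- the body of B's outer loop: the inner 'for length in _LENS' loop updating 'best'
def pvBestStep (lchars : List Char) (best : Option Nat) (i : Int) : Option Nat :=
  pvLens.foldl (fun (b : Option Nat) (L : Nat) =>
    match PySem.Dict.get? pvRankDict (PySem.List.slice lchars (some i) (some (i + (L : Int)))) with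
    | none => b
    | some r =>
      match b with
      | none => some r
      | some b0 => if r < b0 then some r else some b0) best

def guess_stage_from_module_name_py_alt (name : String) : Option String :=
  let lchars := (PySem.Str.lower name).toList
  let best := (PySem.List.pyRange 0 (lchars.length : Int) 1).foldl (pvBestStep lchars) none
  match best with
  | none => none
  | some r => PySem.List.pyGet? pvLabels (r : Int)   -- _LABELS[best]; best < 4 always, so the lookup is exact

-- ===== PRECONDITION & SPEC =====
def Spec_guess_stage_from_module_name_py (name : String) (out : Option String) : Prop := out = guess_stage_from_module_name_py_alt name
instance (name : String) (out : Option String) : Decidable (Spec_guess_stage_from_module_name_py name out) := by unfold Spec_guess_stage_from_module_name_py; infer_instance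

-- ===== CLAIM (what is proved, stated in full; the proofs are below) =====
def Claim_equal_guess_stage_from_module_name_py : Prop := ∀ (name : String), Dom_guess_stage_from_module_name_py name → Spec_guess_stage_from_module_name_py name (guess_stage_from_module_name_py name)

-- ===== LEMMAS AND PROOFS =====

-- minimum on Option Nat (none = "no match yet"), the operation B's 'best' update performs
def pvOmin : Option Nat → Option Nat → Option Nat
  | b, none => b
  | none, some r => some r
  | some b0, some r => if r < b0 then some r else some b0

theorem pvOmin_none_left (b : Option Nat) : pvOmin none b = b := by
  cases b <;> rfl

theorem pvOmin_none_right (b : Option Nat) : pvOmin b none = b := rfl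

theorem pvOmin_some_some (a b : Nat) : pvOmin (some a) (some b) = some (min a b) := by
  simp only [pvOmin]
  split_ifs <;> congr 1 <;> omega

theorem pvOmin_assoc (a b c : Option Nat) : pvOmin (pvOmin a b) c = pvOmin a (pvOmin b c) := by
  cases a <;> cases b <;> cases c <;>
    simp only [pvOmin_none_left, pvOmin_none_right, pvOmin_some_some, Nat.min_assoc]

-- a fold of pvOmin-updates, and its characterisation
def pvFmin {α : Type} (h : α → Option Nat) (xs : List α) : Option Nat :=
  xs.foldl (fun b x => pvOmin b (h x)) none

theorem pvFmin_shift {α : Type} (h : α → Option Nat) (xs : List α) (b : Option Nat) :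
    xs.foldl (fun b x => pvOmin b (h x)) b = pvOmin b (pvFmin h xs) := by
  induction xs generalizing b with
  | nil => rfl
  | cons x xs ih =>
    have hxxs : pvFmin h (x :: xs) = pvOmin (h x) (pvFmin h xs) := by
      simp only [pvFmin, List.foldl_cons]
      rw [ih, pvOmin_none_left]
      rfl
    simp only [List.foldl_cons]
    rw [ih, hxxs, pvOmin_assoc]

theorem pvFmin_cons {α : Type} (h : α → Option Nat) (x : α) (xs : List α) :
    pvFmin h (x :: xs) = pvOmin (h x) (pvFmin h xs) := by
  simp only [pvFmin, List.foldl_cons]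
  rw [pvFmin_shift, pvOmin_none_left]
  rfl

theorem pvFmin_eq_none_iff {α : Type} (h : α → Option Nat) (xs : List α) :
    pvFmin h xs = none ↔ ∀ x ∈ xs, h x = none := by
  induction xs with
  | nil => simp [pvFmin]
  | cons x xs ih =>
    rw [pvFmin_cons]
    cases hx : h x <;> cases hxs : pvFmin h xs <;>
      simp_all [pvOmin_none_left, pvOmin_none_right, pvOmin_some_some]

theorem pvFmin_some_spec {α : Type} (h : α → Option Nat) (xs : List α) (r : Nat)
    (hr : pvFmin h xs = some r) :
    (∃ x ∈ xs, h x = some r) ∧ ∀ x ∈ xs, ∀ s, h x = some s → r ≤ s := by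
  induction xs generalizing r with
  | nil => simp [pvFmin] at hr
  | cons x xs ih =>
    rw [pvFmin_cons] at hr
    cases hx : h x with
    | none =>
      rw [hx, pvOmin_none_left] at hr
      obtain ⟨⟨y, hy, hyr⟩, hmin⟩ := ih _ hr
      refine ⟨⟨y, by simp [hy], hyr⟩, ?_⟩
      intro z hz s hzs
      rcases List.mem_cons.1 hz with rfl | h1
      · rw [hx] at hzs; cases hzs
      · exact hmin z h1 s hzs
    | some ra =>
      cases hxs : pvFmin h xs with
      | none =>
        rw [hx, hxs, pvOmin_none_right] at hr
        injection hr with hra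
        subst hra
        refine ⟨⟨x, by simp, hx⟩, ?_⟩
        intro z hz s hzs
        rcases List.mem_cons.1 hz with rfl | h1
        · rw [hx] at hzs; injection hzs with h2; omega
        · rw [(pvFmin_eq_none_iff h xs).1 hxs z h1] at hzs; cases hzs
      | some rb =>
        rw [hx, hxs, pvOmin_some_some] at hr
        injection hr with hmr
        obtain ⟨⟨y, hy, hyr⟩, hmin⟩ := ih _ hxs
        constructor
        · by_cases hab : ra ≤ rb
          · exact ⟨x, by simp, by rw [hx]; congr 1; omega⟩
          · exact ⟨y, by simp [hy], by rw [hyr]; congr 1; omega⟩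
        · intro z hz s hzs
          rcases List.mem_cons.1 hz with rfl | h1
          · rw [hx] at hzs; injection hzs with h2; omega
          · have := hmin z h1 s hzs; omega

-- the window lookup B performs at position i with window length L
def pvLook (lchars : List Char) (i : Int) (L : Nat) : Option Nat :=
  PySem.Dict.get? pvRankDict (PySem.List.slice lchars (some i) (some (i + (L : Int))))

theorem pvBestStep_eq (lchars : List Char) (b : Option Nat) (i : Int) :
    pvBestStep lchars b i = pvOmin b (pvFmin (pvLook lchars i) pvLens) := by
  unfold pvBestStep
  rw [PySem.List.foldl_congr_mem pvLens _ (fun b L => pvOmin b (pvLook lchars i L)) b ?_]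
  · exact pvFmin_shift _ _ _
  · intro b L _
    unfold pvLook
    cases hg : PySem.Dict.get? pvRankDict (PySem.List.slice lchars (some i) (some (i + (L : Int)))) <;>
      cases b <;> simp only [hg, pvOmin]

-- "some token of rank r has a window hit somewhere"
def pvQ (lchars : List Char) (r : Nat) : Prop :=
  ∃ i ∈ PySem.List.pyRange 0 (lchars.length : Int) 1, ∃ L ∈ pvLens, pvLook lchars i L = some r

theorem pvBest_eq_fmin (lchars : List Char) :
    (PySem.List.pyRange 0 (lchars.length : Int) 1).foldl (pvBestStep lchars) none
      = pvFmin (fun i => pvFmin (pvLook lchars i) pvLens) (PySem.List.pyRange 0 (lchars.length : Int) 1) := by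
  unfold pvFmin
  apply PySem.List.foldl_congr_mem
  intro b i _
  exact pvBestStep_eq lchars b i

theorem pvBest_none_iff (lchars : List Char) :
    (PySem.List.pyRange 0 (lchars.length : Int) 1).foldl (pvBestStep lchars) none = none ↔ ∀ r, ¬ pvQ lchars r := by
  rw [pvBest_eq_fmin, pvFmin_eq_none_iff]
  constructor
  · rintro h r ⟨i, hi, L, hL, hlook⟩
    have := (pvFmin_eq_none_iff _ _).1 (h i hi) L hL
    rw [this] at hlook; cases hlook
  · intro h i hi
    rw [pvFmin_eq_none_iff]
    intro L hL
    cases hlook : pvLook lchars i L with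
    | none => rfl
    | some r => exact absurd ⟨i, hi, L, hL, hlook⟩ (h r)

theorem pvBest_some_spec (lchars : List Char) (r : Nat)
    (h : (PySem.List.pyRange 0 (lchars.length : Int) 1).foldl (pvBestStep lchars) none = some r) :
    pvQ lchars r ∧ ∀ s, pvQ lchars s → r ≤ s := by
  rw [pvBest_eq_fmin] at h
  obtain ⟨⟨i, hi, hhit⟩, hmin⟩ := pvFmin_some_spec _ _ _ h
  obtain ⟨⟨L, hL, hlook⟩, _⟩ := pvFmin_some_spec _ _ _ hhit
  refine ⟨⟨i, hi, L, hL, hlook⟩, ?_⟩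
  rintro s ⟨j, hj, M, hM, hlook'⟩
  cases hhit' : pvFmin (pvLook lchars j) pvLens with
  | none => rw [(pvFmin_eq_none_iff _ _).1 hhit' M hM] at hlook'; cases hlook'
  | some r' =>
    have h1 := (pvFmin_some_spec _ _ _ hhit').2 M hM s hlook'
    have h2 := hmin j hj r' hhit'
    omega

-- a window hit of rank r is exactly a rank-r token occurring as a substring
theorem pvQ_iff (lchars : List Char) (r : Nat) :
    pvQ lchars r ↔ ∃ p ∈ pvRankDict.items, p.2 = r ∧ PySem.Chars.isIn p.1 lchars = true := by
  constructor
  · rintro ⟨i, hi, L, hL, hlook⟩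
    unfold pvLook at hlook
    have hmem := PySem.Dict.mem_items_of_get?_eq_some _ hlook
    refine ⟨_, hmem, rfl, ?_⟩
    rw [PySem.Chars.isIn_iff_infix]
    rcases (PySem.List.mem_pyRange_one).1 hi with ⟨h0, hn⟩
    obtain ⟨j, rfl⟩ := Int.eq_ofNat_of_zero_le h0
    rw [show ((j : Int) + (L : Int)) = ((j + L : Nat) : Int) by push_cast; ring,
        PySem.List.slice_natCast] at *
    exact ((List.take_prefix _ _).isInfix).trans (List.drop_suffix j lchars).isInfix
  · rintro ⟨⟨t, v⟩, hmem, hv, hin⟩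
    simp only at hv; subst hv
    have htne : t ≠ [] ∧ t.length ∈ pvLens := by
      have hm := hmem
      simp only [pvRankDict, List.mem_cons, List.not_mem_nil, or_false,
        Prod.mk.injEq] at hm
      rcases hm with ⟨rfl, -⟩|⟨rfl, -⟩|⟨rfl, -⟩|⟨rfl, -⟩|⟨rfl, -⟩|⟨rfl, -⟩|⟨rfl, -⟩|⟨rfl, -⟩|⟨rfl, -⟩ <;> decide
    obtain ⟨j, hpre⟩ := (PySem.Chars.exists_prefix_drop_iff_isIn _ _).2 hin
    have hjlt : j < lchars.length := by
      by_contra hge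
      rw [List.drop_eq_nil_of_le (by omega)] at hpre
      exact htne.1 (List.prefix_nil.1 hpre)
    refine ⟨(j : Int), (PySem.List.mem_pyRange_one).2 (by constructor <;> omega), t.length, htne.2, ?_⟩
    unfold pvLook
    rw [show ((j : Int) + (t.length : Int)) = ((j + t.length : Nat) : Int) by push_cast; ring,
        PySem.List.slice_natCast]
    have hwin : (lchars.drop j).take (j + t.length - j) = t := by
      rw [show j + t.length - j = t.length by omega]
      exact (List.prefix_iff_eq_take.1 hpre).symm
    rw [hwin]
    exact PySem.Dict.get?_of_mem_items _ hmem (by decide)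

-- the four rank groups, in A's terms
theorem pvQ_elim (lchars : List Char) (r : Nat) (h : pvQ lchars r)
    {motive : Prop}
    (h0 : r = 0 → PySem.Chars.isIn "dino".toList lchars = true → motive)
    (h1 : r = 1 → PySem.Chars.isIn "siglip".toList lchars = true → motive)
    (h2p : r = 2 → PySem.Chars.isIn "projector".toList lchars = true → motive)
    (h2m : r = 2 → PySem.Chars.isIn "mm_projector".toList lchars = true → motive)
    (h3a : r = 3 → PySem.Chars.isIn "llm".toList lchars = true → motive)
    (h3b : r = 3 → PySem.Chars.isIn "mamba".toList lchars = true → motive)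
    (h3c : r = 3 → PySem.Chars.isIn "decoder".toList lchars = true → motive)
    (h3d : r = 3 → PySem.Chars.isIn "language".toList lchars = true → motive)
    (h3e : r = 3 → PySem.Chars.isIn "backbone".toList lchars = true → motive) : motive := by
  obtain ⟨p, hp, hv, hin⟩ := (pvQ_iff lchars r).1 h
  simp only [pvRankDict, List.mem_cons, List.not_mem_nil, or_false] at hp
  rcases hp with rfl|rfl|rfl|rfl|rfl|rfl|rfl|rfl|rfl
  · exact h0 hv.symm hin
  · exact h1 hv.symm hin
  · exact h2p hv.symm hin
  · exact h2m hv.symm hin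
  · exact h3a hv.symm hin
  · exact h3b hv.symm hin
  · exact h3c hv.symm hin
  · exact h3d hv.symm hin
  · exact h3e hv.symm hin

theorem pvQ_intro (lchars : List Char) (t : List Char) (r : Nat)
    (hmem : (t, r) ∈ pvRankDict.items) (hin : PySem.Chars.isIn t lchars = true) : pvQ lchars r :=
  (pvQ_iff lchars r).2 ⟨(t, r), hmem, rfl, hin⟩

theorem pvQ_zero (lchars : List Char) : pvQ lchars 0 ↔ PySem.Chars.isIn "dino".toList lchars = true := by
  constructor
  · intro h
    exact pvQ_elim lchars 0 h (fun _ hin => hin) (by omega) (by omega) (by omega)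
      (by omega) (by omega) (by omega) (by omega) (by omega)
  · intro h
    exact pvQ_intro lchars _ _ (by simp [pvRankDict]) h

theorem pvQ_one (lchars : List Char) : pvQ lchars 1 ↔ PySem.Chars.isIn "siglip".toList lchars = true := by
  constructor
  · intro h
    exact pvQ_elim lchars 1 h (by omega) (fun _ hin => hin) (by omega) (by omega)
      (by omega) (by omega) (by omega) (by omega) (by omega)
  · intro h
    exact pvQ_intro lchars _ _ (by simp [pvRankDict]) h

theorem pvQ_two (lchars : List Char) :
    pvQ lchars 2 ↔ (PySem.Chars.isIn "projector".toList lchars = true ∨ PySem.Chars.isIn "mm_projector".toList lchars = true) := by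
  constructor
  · intro h
    exact pvQ_elim lchars 2 h (by omega) (by omega) (fun _ hin => Or.inl hin)
      (fun _ hin => Or.inr hin) (by omega) (by omega) (by omega) (by omega) (by omega)
  · rintro (h | h)
    · exact pvQ_intro lchars _ _ (by simp [pvRankDict]) h
    · exact pvQ_intro lchars _ _ (by simp [pvRankDict]) h

theorem pvQ_three (lchars : List Char) :
    pvQ lchars 3 ↔ (PySem.Chars.isIn "llm".toList lchars = true ∨ PySem.Chars.isIn "mamba".toList lchars = true ∨
      PySem.Chars.isIn "decoder".toList lchars = true ∨ PySem.Chars.isIn "language".toList lchars = true ∨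
      PySem.Chars.isIn "backbone".toList lchars = true) := by
  constructor
  · intro h
    exact pvQ_elim lchars 3 h (by omega) (by omega) (by omega) (by omega)
      (fun _ hin => Or.inl hin) (fun _ hin => Or.inr (Or.inl hin))
      (fun _ hin => Or.inr (Or.inr (Or.inl hin)))
      (fun _ hin => Or.inr (Or.inr (Or.inr (Or.inl hin))))
      (fun _ hin => Or.inr (Or.inr (Or.inr (Or.inr hin))))
  · rintro (h | h | h | h | h) <;>
      exact pvQ_intro lchars _ _ (by simp [pvRankDict]) h

theorem pvQ_bound (lchars : List Char) (r : Nat) (h : pvQ lchars r) : r ≤ 3 :=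
  pvQ_elim lchars r h (by omega) (by omega) (by omega) (by omega) (by omega)
    (by omega) (by omega) (by omega) (by omega)

-- ===== VERDICT (by name: the statement is the Claim_ definition above) =====
set_option maxHeartbeats 1000000 in
theorem guess_stage_from_module_name_py_spec : Claim_equal_guess_stage_from_module_name_py := by
  intro name _
  unfold Spec_guess_stage_from_module_name_py guess_stage_from_module_name_py guess_stage_from_module_name_py_alt
  simp only [PySem.Str.isIn_eq, List.any_cons, List.any_nil, Bool.or_false]
  set lchars := (PySem.Str.lower name).toList with hlc
  cases hb : (PySem.List.pyRange 0 (lchars.length : Int) 1).foldl (pvBestStep lchars) none with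
  | none =>
    have hnone := (pvBest_none_iff lchars).1 hb
    have h0 := fun h => hnone 0 ((pvQ_zero lchars).2 h)
    have h1 := fun h => hnone 1 ((pvQ_one lchars).2 h)
    have h2 := fun h => hnone 2 ((pvQ_two lchars).2 h)
    have h3 := fun h => hnone 3 ((pvQ_three lchars).2 h)
    simp only [Bool.or_eq_true] at *
    rw [if_neg (by simp_all), if_neg (by simp_all), if_neg (by simp_all), if_neg (by simp_all)]
  | some r =>
    obtain ⟨hq, hmin⟩ := pvBest_some_spec lchars r hb
    have hbd := pvQ_bound lchars r hq
    interval_cases r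
    · rw [if_pos ((pvQ_zero lchars).1 hq)]; rfl
    · have h0 : ¬ PySem.Chars.isIn "dino".toList lchars = true := fun h =>
        by have := hmin 0 ((pvQ_zero lchars).2 h); omega
      rw [if_neg h0, if_pos ((pvQ_one lchars).1 hq)]; rfl
    · have h0 : ¬ PySem.Chars.isIn "dino".toList lchars = true := fun h =>
        by have := hmin 0 ((pvQ_zero lchars).2 h); omega
      have h1 : ¬ PySem.Chars.isIn "siglip".toList lchars = true := fun h =>
        by have := hmin 1 ((pvQ_one lchars).2 h); omega
      have h2 := (pvQ_two lchars).1 hq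
      rw [if_neg h0, if_neg h1, if_pos (by simp only [Bool.or_eq_true]; exact h2)]; rfl
    · have h0 : ¬ PySem.Chars.isIn "dino".toList lchars = true := fun h =>
        by have := hmin 0 ((pvQ_zero lchars).2 h); omega
      have h1 : ¬ PySem.Chars.isIn "siglip".toList lchars = true := fun h =>
        by have := hmin 1 ((pvQ_one lchars).2 h); omega
      have h2 : ¬ (PySem.Chars.isIn "projector".toList lchars = true ∨ PySem.Chars.isIn "mm_projector".toList lchars = true) := fun h =>
        by have := hmin 2 ((pvQ_two lchars).2 h); omega
      have h3 := (pvQ_three lchars).1 hq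
      rw [if_neg h0, if_neg h1, if_neg (by simp only [Bool.or_eq_true]; exact h2),
          if_pos (by simp only [Bool.or_eq_true]; tauto)]
      rfl
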